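-- pv_equiv track=rewrite | github.com/geneontology/gocamgen | gpad_extensions_mapper.py | following_rules
-- ===== SOURCE A (Python) =====
-- def sum_combos(extension_counts, combo_list):
--     cur_sum = 0
--     for c in combo_list:
--         if c in extension_counts:
--             cur_sum += extension_counts[c]
--     return cur_sum
--
-- def violates_combo_rule(extension_counts, list_of_combo_lists, max_allowed):
--     for combo_list in list_of_combo_lists:
--         if sum_combos(extension_counts, combo_list) > max_allowed:
--             return True
--     return False
--
-- def following_rules(extension_list, aspect):
--     ext_counts = {}
--     for e in extension_list:
--         if e in ext_counts:
--             ext_counts[e] += 1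
--         else:
--             ext_counts[e] = 1
--
--     function_singles_only = [
--         "occurs_in(GO:C)",
--         "occurs_in(CL)",
--         "occurs_in(UBERON)",
--         "occurs_in(EMAPA)",
--         "has_input(geneID)",
--         "has_input(CHEBI)",
--         "has_direct_input(geneID)",
--         "has_direct_input(CHEBI)",
--         "happens_during(GO:P)",
--         "part_of(GO:P)",
--         "has_regulation_target(geneID)",
--         "activated_by(CHEBI)",
--         "inhibited_by(CHEBI)"
--     ]
--     # component_singles_only = [
--     #     "occurs_in(GO:C)",
--     #     "occurs_in(CL)",
--     #     "occurs_in(UBERON)",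
--     #     "occurs_in(EMAPA)"
--     # ]
--     component_singles_only = [
--         "part_of(GO:C)",
--         "part_of(CL)",
--         "part_of(UBERON)",
--         "part_of(EMAPA)"
--     ]
--     process_singles_only = [
--         "occurs_in(GO:C)",
--         "occurs_in(CL)",
--         "occurs_in(UBERON)",
--         "occurs_in(EMAPA)",
--         "has_input(geneID)",
--         "has_input(CHEBI)",
--         "has_direct_input(geneID)",
--         "has_direct_input(CHEBI)",
--         "part_of(GO:P)"
--     ]
--     combos_to_check_for = [
--         ["occurs_in(UBERON)", "occurs_in(EMAPA)"]
--     ]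
--     if aspect == "F":
--         for s in function_singles_only:
--             if s in ext_counts and ext_counts[s] > 1:
--                 return False
--         for ek in ext_counts.keys():
--             if ek not in function_singles_only:
--                 return False    # unrecognised relation-term combo
--         combos_to_check_for.append(["has_input(geneID)", "has_input(CHEBI)",
--                                     "has_direct_input(geneID)", "has_direct_input(CHEBI)"])
--     if aspect == "C":
--         for s in component_singles_only:
--             if s in ext_counts and ext_counts[s] > 1:
--                 return False
--         for ek in ext_counts.keys():
--             if ek not in component_singles_only:
--                 return False    # unrecognised relation-term combo
--     if aspect == "P":
--         for s in process_singles_only: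
--             if s in ext_counts and ext_counts[s] > 1:
--                 return False
--         for ek in ext_counts.keys():
--             if ek not in process_singles_only:
--                 return False    # unrecognised relation-term combo
--         combos_to_check_for.append(["has_input(geneID)", "has_input(CHEBI)",
--                                     "has_direct_input(geneID)", "has_direct_input(CHEBI)"])
--     if violates_combo_rule(ext_counts, combos_to_check_for, 1):
--         return False
--     return True
-- ===== SOURCE B (Python) =====
-- _FUNCTION_SINGLES = frozenset([
--     "occurs_in(GO:C)",
--     "occurs_in(CL)",
--     "occurs_in(UBERON)",
--     "occurs_in(EMAPA)",
--     "has_input(geneID)",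
--     "has_input(CHEBI)",
--     "has_direct_input(geneID)",
--     "has_direct_input(CHEBI)",
--     "happens_during(GO:P)",
--     "part_of(GO:P)",
--     "has_regulation_target(geneID)",
--     "activated_by(CHEBI)",
--     "inhibited_by(CHEBI)",
-- ])
--
-- _COMPONENT_SINGLES = frozenset([
--     "part_of(GO:C)",
--     "part_of(CL)",
--     "part_of(UBERON)",
--     "part_of(EMAPA)",
-- ])
--
-- _PROCESS_SINGLES = frozenset([
--     "occurs_in(GO:C)",
--     "occurs_in(CL)",
--     "occurs_in(UBERON)",
--     "occurs_in(EMAPA)",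
--     "has_input(geneID)",
--     "has_input(CHEBI)",
--     "has_direct_input(geneID)",
--     "has_direct_input(CHEBI)",
--     "part_of(GO:P)",
-- ])
--
-- _ALLOWED_BY_ASPECT = {
--     "F": _FUNCTION_SINGLES,
--     "C": _COMPONENT_SINGLES,
--     "P": _PROCESS_SINGLES,
-- }
--
-- _BASE_COMBO = frozenset(["occurs_in(UBERON)", "occurs_in(EMAPA)"])
-- _INPUT_COMBO = frozenset(["has_input(geneID)", "has_input(CHEBI)",
--                           "has_direct_input(geneID)", "has_direct_input(CHEBI)"])
--
--
-- def following_rules(extension_list, aspect):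
--     # No occurrence counting at all: for a known aspect, stream the list once with a
--     # seen-set -- any term outside the allowed set, or any repeat, fails immediately
--     # (allowed + count<=1 is exactly "all allowed and no duplicates").  The combo rule
--     # is a direct membership tally of the input list against the combo set.
--     allowed = _ALLOWED_BY_ASPECT.get(aspect)
--     if allowed is not None:
--         seen = set()
--         for e in extension_list:
--             if e not in allowed or e in seen:
--                 return False
--             seen.add(e)
--     if sum(e in _BASE_COMBO for e in extension_list) > 1:
--         return False
--     if aspect in ("F", "P") and sum(e in _INPUT_COMBO for e in extension_list) > 1:
--         return False
--     return True
-- ===== Notes on version B (the rewrite author's own statement) =====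
-- stated objective: alternative
-- what changed: B builds no occurrence-count dict at all: for a known aspect it streams the list once with a seen-set, failing on the first disallowed or repeated term (allowed-and-count<=1 equals all-allowed-and-no-duplicates), and checks each combo rule by directly tallying membership of the input list in the combo set instead of summing dict counts over combo lists.
import Mathlib
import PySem

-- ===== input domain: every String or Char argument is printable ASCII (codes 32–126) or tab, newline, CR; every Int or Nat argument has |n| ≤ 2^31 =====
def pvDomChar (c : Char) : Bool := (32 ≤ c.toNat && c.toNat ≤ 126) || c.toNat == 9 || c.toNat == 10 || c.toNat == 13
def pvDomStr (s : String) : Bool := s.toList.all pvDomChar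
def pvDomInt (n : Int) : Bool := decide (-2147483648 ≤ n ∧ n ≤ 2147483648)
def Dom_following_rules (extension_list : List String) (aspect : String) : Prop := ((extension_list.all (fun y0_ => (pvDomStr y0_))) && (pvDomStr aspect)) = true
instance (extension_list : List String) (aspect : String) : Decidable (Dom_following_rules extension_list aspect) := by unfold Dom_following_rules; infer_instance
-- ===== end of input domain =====

-- B drops A's occurrence-count dict entirely: one streaming pass with a seen-set (fail on first
-- disallowed or repeated term) plus direct membership tallies for the combo rules; objective: alternative.


-- ===== PORT A =====
def pvFunctionSingles : List String :=
  ["occurs_in(GO:C)", "occurs_in(CL)", "occurs_in(UBERON)", "occurs_in(EMAPA)",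
   "has_input(geneID)", "has_input(CHEBI)", "has_direct_input(geneID)",
   "has_direct_input(CHEBI)", "happens_during(GO:P)", "part_of(GO:P)",
   "has_regulation_target(geneID)", "activated_by(CHEBI)", "inhibited_by(CHEBI)"]

def pvComponentSingles : List String :=
  ["part_of(GO:C)", "part_of(CL)", "part_of(UBERON)", "part_of(EMAPA)"]

def pvProcessSingles : List String :=
  ["occurs_in(GO:C)", "occurs_in(CL)", "occurs_in(UBERON)", "occurs_in(EMAPA)",
   "has_input(geneID)", "has_input(CHEBI)", "has_direct_input(geneID)",
   "has_direct_input(CHEBI)", "part_of(GO:P)"]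

def pvBaseCombo : List String := ["occurs_in(UBERON)", "occurs_in(EMAPA)"]

def pvInputCombo : List String :=
  ["has_input(geneID)", "has_input(CHEBI)", "has_direct_input(geneID)", "has_direct_input(CHEBI)"]

-- helper sum_combos: cur_sum accumulated over combo_list, adding counts[c] when c in counts
def sum_combos (extension_counts : PySem.Dict String Int) (combo_list : List String) : Int :=
  combo_list.foldl
    (fun cur_sum c =>
      if extension_counts.contains c then cur_sum + extension_counts.getD c 0 else cur_sum) 0

-- helper violates_combo_rule: early-return-True loop = any
def violates_combo_rule (extension_counts : PySem.Dict String Int)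
    (list_of_combo_lists : List (List String)) (max_allowed : Int) : Bool :=
  list_of_combo_lists.any (fun combo_list => sum_combos extension_counts combo_list > max_allowed)

-- A's two per-aspect early-return-False scans: the singles scan, then the keys scan (early return = any)
def pvAspectScanFails (ext_counts : PySem.Dict String Int) (singles : List String) : Bool :=
  singles.any (fun s => ext_counts.contains s && decide (ext_counts.getD s 0 > 1)) ||
  ext_counts.keys.any (fun ek => !(singles.contains ek))

def following_rules (extension_list : List String) (aspect : String) : Bool :=
  let ext_counts : PySem.Dict String Int :=
    extension_list.foldl
      (fun d e => if d.contains e then d.insert e (d.getD e 0 + 1) else d.insert e 1)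
      PySem.Dict.empty
  -- A's three sequential 'if aspect == …' blocks test mutually exclusive string literals, so at
  -- most one fires; the transliteration chains them, each branch ending with A's final combo check
  -- on the combos list as that branch leaves it ([base] plus the appended input-combo for F and P).
  if aspect == "F" then
    if pvAspectScanFails ext_counts pvFunctionSingles then false
    else if violates_combo_rule ext_counts [pvBaseCombo, pvInputCombo] 1 then false
    else true
  else if aspect == "C" then
    if pvAspectScanFails ext_counts pvComponentSingles then false
    else if violates_combo_rule ext_counts [pvBaseCombo] 1 then false
    else true
  else if aspect == "P" then
    if pvAspectScanFails ext_counts pvProcessSingles then false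
    else if violates_combo_rule ext_counts [pvBaseCombo, pvInputCombo] 1 then false
    else true
  else
    if violates_combo_rule ext_counts [pvBaseCombo] 1 then false
    else true

-- ===== PORT B =====
-- the aspect -> allowed-terms table (values are Python frozensets = PySem.Set, here literal distinct lists)
def pvAllowedByAspect : PySem.Dict String (List String) :=
  PySem.Dict.ofList
    [("F", pvFunctionSingles), ("C", pvComponentSingles), ("P", pvProcessSingles)]

-- Source B's streaming loop with early return: fail on first disallowed or already-seen term
def pvSeenScan (allowed : List String) (seen : PySem.Set String) : List String → Bool
  | [] => true
  | e :: rest =>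
      if !(allowed.contains e) || seen.contains e then false
      else pvSeenScan allowed (PySem.Set.add seen e) rest

def following_rules_alt (extension_list : List String) (aspect : String) : Bool :=
  let ok :=
    match pvAllowedByAspect.get? aspect with
    | some allowed => pvSeenScan allowed PySem.Set.empty extension_list
    | none => true
  if !ok then false
  else if (extension_list.map (fun e => if pvBaseCombo.contains e then (1 : Int) else 0)).sum > 1 then
    false
  else if (["F", "P"].contains aspect)
      && decide ((extension_list.map (fun e => if pvInputCombo.contains e then (1 : Int) else 0)).sum > 1) then
    false
  else true

-- ===== PRECONDITION & SPEC =====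
def Spec_following_rules (extension_list : List String) (aspect : String) (out : Bool) : Prop := out = following_rules_alt extension_list aspect
instance (extension_list : List String) (aspect : String) (out : Bool) : Decidable (Spec_following_rules extension_list aspect out) := by unfold Spec_following_rules; infer_instance

-- ===== CLAIM (what is proved, stated in full; the proofs are below) =====
def Claim_equal_following_rules : Prop := ∀ (extension_list : List String) (aspect : String), Dom_following_rules extension_list aspect → Spec_following_rules extension_list aspect (following_rules extension_list aspect)

-- ===== LEMMAS AND PROOFS =====

-- A's incremental counting loop builds Counter(extension_list)
theorem dictA_eq_counter (l : List String) :
    l.foldl (fun d e => if d.contains e then d.insert e (d.getD e 0 + 1) else d.insert e 1)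
      PySem.Dict.empty = PySem.Dict.counter l := by
  rw [← PySem.Dict.foldl_insert_getD_add_one_eq_counter]
  congr 1
  funext d e
  by_cases h : d.contains e
  · simp [h]
  · simp [h, PySem.Dict.getD_of_not_contains d 0 (by simpa using h)]

-- sum_combos' conditional accumulation over Counter(l) sums the multiplicities of the combo terms
theorem sum_combos_counter (l : List String) (cl : List String) :
    sum_combos (PySem.Dict.counter l) cl = (cl.map (fun c => (l.count c : Int))).sum := by
  unfold sum_combos
  have hstep : (fun (cur_sum : Int) (c : String) =>
      if (PySem.Dict.counter l).contains c then cur_sum + (PySem.Dict.counter l).getD c 0 else cur_sum)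
      = fun cur_sum c => cur_sum + (l.count c : Int) := by
    funext s c
    by_cases h : (PySem.Dict.counter l).contains c
    · simp [h, PySem.Dict.getD_counter]
    · have hnm : c ∉ l := by
        have : l.contains c = false := by
          have hc := PySem.Dict.contains_counter l c
          rw [← hc]; simpa using h
        simpa [List.contains_eq_mem] using this
      simp [h, List.count_eq_zero_of_not_mem hnm]
  rw [hstep, PySem.List.foldl_add]
  simp

-- counting a term in a cons, over Int, with the test in B's orientation
theorem count_cons_int (c x : String) (xs : List String) :
    ((List.count c (x :: xs) : Int)) = (List.count c xs : Int) + if c == x then (1 : Int) else 0 := by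
  rw [List.count_cons]
  by_cases h : c = x
  · subst h; simp
  · rw [if_neg (by simpa using (Ne.symm h)), if_neg (by simpa using h)]
    simp

-- summing multiplicities over a duplicate-free combo list = tallying membership over the input list
theorem sum_count_eq_countP (C : List String) (hC : C.Nodup) (l : List String) :
    (C.map (fun c => (l.count c : Int))).sum = (l.countP (fun e => C.contains e) : Int) := by
  induction l with
  | nil => simp
  | cons x xs ih =>
    have h1 : (C.map (fun c => ((x :: xs).count c : Int))).sum
        = (C.map (fun c => (xs.count c : Int))).sum
          + (C.map (fun c => if c == x then (1 : Int) else 0)).sum := by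
      rw [← PySem.List.sum_map_add_int]
      congr 1
      apply List.map_congr_left
      intro c _
      exact count_cons_int c x xs
    have h2 : (C.map (fun c => if c == x then (1 : Int) else 0)).sum
        = if C.contains x then (1 : Int) else 0 := by
      rw [PySem.List.sum_map_ite_one_zero]
      by_cases hx : x ∈ C
      · rw [show C.countP (fun c => c == x) = C.count x from rfl,
          List.count_eq_one_of_mem hC hx]
        simp [List.contains_eq_mem, hx]
      · rw [show C.countP (fun c => c == x) = C.count x from rfl,
          List.count_eq_zero_of_not_mem hx]
        simp [List.contains_eq_mem, hx]
    rw [h1, h2, ih, List.countP_cons]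
    split_ifs with h <;> push_cast <;> ring

-- B's 0/1 membership sum over the input list is the same membership tally
theorem sum_ite_mem (l : List String) (C : List String) :
    (l.map (fun e => if C.contains e then (1 : Int) else 0)).sum
      = (l.countP (fun e => C.contains e) : Int) :=
  PySem.List.sum_map_ite_one_zero (fun e => C.contains e) l

-- hence A's sum over a duplicate-free combo equals B's membership sum over the input
theorem sum_combos_eq_sum_ite (l : List String) (C : List String) (hC : C.Nodup) :
    sum_combos (PySem.Dict.counter l) C
      = (l.map (fun e => if C.contains e then (1 : Int) else 0)).sum := by
  rw [sum_combos_counter, sum_count_eq_countP C hC, sum_ite_mem]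

-- A's not-scan-fails on Counter(l) says: every term allowed and no term repeated
theorem scanFails_false_iff (l : List String) (S : List String) :
    pvAspectScanFails (PySem.Dict.counter l) S = false ↔ ((∀ e ∈ l, e ∈ S) ∧ l.Nodup) := by
  unfold pvAspectScanFails
  simp only [Bool.or_eq_false_iff, List.any_eq_false, Bool.and_eq_true, decide_eq_true_eq,
    not_and, not_lt, PySem.Dict.keys_counter, PySem.Dict.getD_counter,
    PySem.Dict.contains_counter, Bool.not_eq_true', decide_eq_false_iff_not, not_not,
    List.contains_eq_mem, PySem.Set.mem_ofList, decide_eq_true_eq]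
  constructor
  · rintro ⟨h1, h2⟩
    refine ⟨fun e he => h2 e he, ?_⟩
    rw [List.nodup_iff_count_le_one]
    intro a
    by_cases ha : a ∈ l
    · have := h1 a (h2 a ha) (by simpa [List.contains_eq_mem] using ha)
      omega
    · simp [List.count_eq_zero_of_not_mem ha]
  · rintro ⟨hall, hnd⟩
    have hcnt := List.nodup_iff_count_le_one.mp hnd
    refine ⟨fun s _ _ => ?_, fun ek hek => hall ek hek⟩
    have := hcnt s
    exact_mod_cast this

-- B's seen-set streaming pass, characterised over any current seen set
theorem pvSeenScan_true_iff (allowed : List String) :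
    ∀ (l : List String) (seen : PySem.Set String),
      pvSeenScan allowed seen l = true
        ↔ ((∀ e ∈ l, e ∈ allowed) ∧ l.Nodup ∧ ∀ e ∈ l, e ∉ seen) := by
  intro l
  induction l with
  | nil => intro seen; simp [pvSeenScan]
  | cons e rest ih =>
    intro seen
    rw [pvSeenScan]
    by_cases h1 : e ∈ allowed
    · by_cases h2 : e ∈ seen
      · rw [if_pos (by simp [List.contains_eq_mem, h2])]
        constructor
        · intro h; cases h
        · rintro ⟨_, _, hs⟩; exact absurd h2 (hs e (List.mem_cons_self))
      · rw [if_neg (by simp [List.contains_eq_mem, h1, h2]), ih]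
        constructor
        · rintro ⟨ha, hnd, hseen⟩
          refine ⟨?_, ?_, ?_⟩
          · intro x hx
            rcases List.mem_cons.mp hx with rfl | hx
            · exact h1
            · exact ha x hx
          · rw [List.nodup_cons]
            refine ⟨fun hm => ?_, hnd⟩
            exact (hseen e hm) ((PySem.Set.mem_add seen e e).mpr (Or.inr rfl))
          · intro x hx
            rcases List.mem_cons.mp hx with rfl | hx
            · exact h2
            · intro hxs
              exact (hseen x hx) ((PySem.Set.mem_add seen e x).mpr (Or.inl hxs))
        · rintro ⟨ha, hnd, hs⟩
          have hnc := List.nodup_cons.mp hnd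
          refine ⟨fun x hx => ha x (List.mem_cons_of_mem _ hx), hnc.2, ?_⟩
          intro x hx hxa
          rcases (PySem.Set.mem_add seen e x).mp hxa with hxs | rfl
          · exact hs x (List.mem_cons_of_mem _ hx) hxs
          · exact hnc.1 hx
    · rw [if_pos (by simp [List.contains_eq_mem, h1])]
      constructor
      · intro h; cases h
      · rintro ⟨ha, _, _⟩; exact (h1 (ha e List.mem_cons_self)).elim

-- A's per-aspect double scan is the negation of B's streaming pass (started from the empty set)
theorem scanFails_eq_not_seenScan (l : List String) (S : List String) :
    pvAspectScanFails (PySem.Dict.counter l) S = !(pvSeenScan S PySem.Set.empty l) := by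
  have hA := scanFails_false_iff l S
  have hB := pvSeenScan_true_iff S l PySem.Set.empty
  cases hsc : pvSeenScan S PySem.Set.empty l
  · rw [hsc] at hB
    simp only [Bool.not_false]
    cases hfa : pvAspectScanFails (PySem.Dict.counter l) S
    · exfalso
      rcases hA.mp hfa with ⟨h1, h2⟩
      have : pvSeenScan S PySem.Set.empty l = true :=
        (pvSeenScan_true_iff S l PySem.Set.empty).mpr
          ⟨h1, h2, fun e _ h => by simpa [PySem.Set.empty] using h⟩
      rw [hsc] at this; cases this
    · rfl
  · rw [hsc] at hB
    rcases hB.mp rfl with ⟨h1, h2, _⟩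
    simp only [Bool.not_true]
    exact hA.mpr ⟨h1, h2⟩

theorem get?_allowed_other (aspect : String) (h1 : aspect ≠ "F") (h2 : aspect ≠ "C")
    (h3 : aspect ≠ "P") : pvAllowedByAspect.get? aspect = none := by
  simp [pvAllowedByAspect, PySem.Dict.ofList, PySem.Dict.update, PySem.Dict.get?_insert,
    h1, h2, h3]

-- ===== VERDICT (by name: the statement is the Claim_ definition above) =====
theorem following_rules_spec : Claim_equal_following_rules := by
  intro l aspect _
  unfold Spec_following_rules following_rules following_rules_alt
  simp only [dictA_eq_counter]
  have hBnd : pvBaseCombo.Nodup := by decide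
  have hInd : pvInputCombo.Nodup := by decide
  by_cases hF : aspect = "F"
  · subst hF
    have hg : pvAllowedByAspect.get? "F" = some pvFunctionSingles := by
      simp [pvAllowedByAspect, PySem.Dict.ofList, PySem.Dict.update, PySem.Dict.get?_insert]
    simp only [hg, beq_self_eq_true, if_true, violates_combo_rule, List.any_cons, List.any_nil,
      sum_combos_eq_sum_ite l pvBaseCombo hBnd, sum_combos_eq_sum_ite l pvInputCombo hInd,
      scanFails_eq_not_seenScan,
      show (["F", "P"].contains ("F" : String)) = true by decide]
    cases pvSeenScan pvFunctionSingles PySem.Set.empty l <;>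
      cases hb : decide ((l.map (fun e => if pvBaseCombo.contains e then (1 : Int) else 0)).sum > 1) <;>
      cases hi : decide ((l.map (fun e => if pvInputCombo.contains e then (1 : Int) else 0)).sum > 1) <;>
      simp_all
  · by_cases hC : aspect = "C"
    · subst hC
      have hg : pvAllowedByAspect.get? "C" = some pvComponentSingles := by
        simp [pvAllowedByAspect, PySem.Dict.ofList, PySem.Dict.update, PySem.Dict.get?_insert]
      simp only [hg, show (("C" : String) == "F") = false by decide, Bool.false_eq_true,
        if_false, beq_self_eq_true, if_true, violates_combo_rule, List.any_cons, List.any_nil,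
        sum_combos_eq_sum_ite l pvBaseCombo hBnd,
        scanFails_eq_not_seenScan,
        show (["F", "P"].contains ("C" : String)) = false by decide]
      cases pvSeenScan pvComponentSingles PySem.Set.empty l <;>
        cases hb : decide ((l.map (fun e => if pvBaseCombo.contains e then (1 : Int) else 0)).sum > 1) <;>
        simp_all
    · by_cases hP : aspect = "P"
      · subst hP
        have hg : pvAllowedByAspect.get? "P" = some pvProcessSingles := by
          simp [pvAllowedByAspect, PySem.Dict.ofList, PySem.Dict.update]
        simp only [hg, show (("P" : String) == "F") = false by decide,
          show (("P" : String) == "C") = false by decide, Bool.false_eq_true, if_false,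
          beq_self_eq_true, if_true, violates_combo_rule, List.any_cons, List.any_nil,
          sum_combos_eq_sum_ite l pvBaseCombo hBnd, sum_combos_eq_sum_ite l pvInputCombo hInd,
          scanFails_eq_not_seenScan,
          show (["F", "P"].contains ("P" : String)) = true by decide]
        cases pvSeenScan pvProcessSingles PySem.Set.empty l <;>
          cases hb : decide ((l.map (fun e => if pvBaseCombo.contains e then (1 : Int) else 0)).sum > 1) <;>
          cases hi : decide ((l.map (fun e => if pvInputCombo.contains e then (1 : Int) else 0)).sum > 1) <;>
          simp_all
      · have hg := get?_allowed_other aspect hF hC hP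
        have hco : (["F", "P"].contains aspect) = false := by
          simp [List.contains_eq_mem, hF, hP]
        simp only [hg, hco, beq_iff_eq, hF, hC, hP, if_false, violates_combo_rule, List.any_cons, List.any_nil,
          sum_combos_eq_sum_ite l pvBaseCombo hBnd]
        cases hb : decide ((l.map (fun e => if pvBaseCombo.contains e then (1 : Int) else 0)).sum > 1) <;>
          simp_all
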